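-- pv_equiv track=rewrite | github.com/tier4/pre-commit-hooks-ros | pre_commit_hooks/ros_include_guard.py | split_space_boundary
-- ===== SOURCE A (Python) =====
-- def split_space_boundary(text, delimiters={' '}):
--
--   result = []
--   prev = None
--   for char in text:
--     curr = char in delimiters
--     if curr != prev:
--       result.append(char)
--     else:
--       result[-1] += char
--     prev = curr
--   return result
-- ===== SOURCE B (Python) =====
-- def split_space_boundary(text, delimiters={' '}):
--     result = []
--     i, n = 0, len(text)
--     while i < n:
--         flag = text[i] in delimiters
--         j = i + 1
--         while j < n and (text[j] in delimiters) == flag: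
--             j += 1
--         result.append(text[i:j])
--         i = j
--     return result
-- ===== Notes on version B (the rewrite author's own statement) =====
-- stated objective: faster
-- what changed: B scans one run at a time (advance an index to the run's end, then slice the run out of the text), instead of A's char-by-char loop that grows the last list element with repeated string concatenation.
import Mathlib
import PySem

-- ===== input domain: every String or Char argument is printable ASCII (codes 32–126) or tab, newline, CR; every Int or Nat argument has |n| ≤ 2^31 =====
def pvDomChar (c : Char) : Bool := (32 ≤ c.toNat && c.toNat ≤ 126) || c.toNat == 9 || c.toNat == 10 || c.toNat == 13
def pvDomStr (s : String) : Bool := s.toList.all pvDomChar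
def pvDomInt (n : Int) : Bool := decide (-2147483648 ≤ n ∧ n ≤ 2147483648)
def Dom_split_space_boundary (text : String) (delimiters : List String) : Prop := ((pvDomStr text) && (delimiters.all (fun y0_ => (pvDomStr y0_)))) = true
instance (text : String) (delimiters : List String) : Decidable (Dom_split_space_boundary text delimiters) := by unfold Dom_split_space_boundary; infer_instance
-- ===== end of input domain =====

-- B splits run-at-a-time (scan to the run's end, slice) instead of A's char-by-char accumulation.

-- `char in delimiters` for a one-character string
def pvMem (delimiters : List String) (c : Char) : Bool :=
  delimiters.contains (String.mk [c])

-- ===== PORT A =====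
-- state: (runs, most recent first, each run's chars most recent first; prev flag)
def pvStepA (delimiters : List String) (st : List (List Char) × Option Bool) (c : Char) :
    List (List Char) × Option Bool :=
  let curr := pvMem delimiters c
  if st.2 ≠ some curr then
    ([c] :: st.1, some curr)
  else
    (match st.1 with
     | [] => [[c]]            -- unreachable: prev = some _ implies result nonempty
     | h :: t => (c :: h) :: t, some curr)

def split_space_boundary (text : String) (delimiters : List String) : List String :=
  ((text.toList.foldl (pvStepA delimiters) ([], none)).1.reverse).map
    (fun l => String.mk l.reverse)

-- ===== PORT B =====
def pvRunsB (delimiters : List String) : List Char → List (List Char)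
  | [] => []
  | c :: cs =>
    (c :: cs.takeWhile (fun d => pvMem delimiters d = pvMem delimiters c)) ::
      pvRunsB delimiters (cs.dropWhile (fun d => pvMem delimiters d = pvMem delimiters c))
termination_by l => l.length
decreasing_by
  simp only [List.length_cons]
  exact Nat.lt_succ_of_le (List.length_dropWhile_le _ _)

def split_space_boundary_alt (text : String) (delimiters : List String) : List String :=
  (pvRunsB delimiters text.toList).map String.mk

-- ===== PRECONDITION & SPEC =====
def Spec_split_space_boundary (text : String) (delimiters : List String) (out : List String) : Prop := out = split_space_boundary_alt text delimiters
instance (text : String) (delimiters : List String) (out : List String) : Decidable (Spec_split_space_boundary text delimiters out) := by unfold Spec_split_space_boundary; infer_instance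

-- ===== CLAIM (what is proved, stated in full; the proofs are below) =====
def Claim_equal_split_space_boundary : Prop := ∀ (text : String) (delimiters : List String), Dom_split_space_boundary text delimiters → Spec_split_space_boundary text delimiters (split_space_boundary text delimiters)

-- ===== LEMMAS AND PROOFS =====

lemma foldA_runs (delims : List String) (cs : List Char) :
    ∀ (r : List Char) (acc : List (List Char)) (f : Bool),
    ((cs.foldl (pvStepA delims) (r :: acc, some f)).1).reverse.map List.reverse
      = (acc.reverse.map List.reverse)
        ++ ((r.reverse ++ cs.takeWhile (fun d => pvMem delims d = f))
            :: pvRunsB delims (cs.dropWhile (fun d => pvMem delims d = f))) := by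
  induction cs with
  | nil => intro r acc f; simp [pvRunsB]
  | cons c cs ih =>
    intro r acc f
    by_cases h : pvMem delims c = f
    · have : (c :: cs).foldl (pvStepA delims) (r :: acc, some f)
          = cs.foldl (pvStepA delims) ((c :: r) :: acc, some f) := by
        simp [List.foldl, pvStepA, h]
      rw [this, ih]
      simp [h, List.takeWhile_cons, List.dropWhile_cons]
    · have : (c :: cs).foldl (pvStepA delims) (r :: acc, some f)
          = cs.foldl (pvStepA delims) ([c] :: r :: acc, some (pvMem delims c)) := by
        simp only [List.foldl, pvStepA]
        rw [if_pos (by simpa using Ne.symm h)]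
      rw [this, ih]
      rw [List.takeWhile_cons, List.dropWhile_cons]
      simp [h, pvRunsB]

-- ===== VERDICT (by name: the statement is the Claim_ definition above) =====
theorem split_space_boundary_spec : Claim_equal_split_space_boundary := by
  unfold Claim_equal_split_space_boundary
  intro text delims _
  unfold Spec_split_space_boundary split_space_boundary split_space_boundary_alt
  cases htl : text.toList with
  | nil => simp [pvRunsB]
  | cons c cs =>
    have hstep : (c :: cs).foldl (pvStepA delims) ([], none)
        = cs.foldl (pvStepA delims) ([c] :: [], some (pvMem delims c)) := by
      simp [List.foldl, pvStepA]
    rw [hstep]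
    have hmm : ∀ (X : List (List Char)),
        List.map (fun l => String.mk l.reverse) X = List.map String.mk (X.map List.reverse) := by
      intro X; simp [List.map_map]
    rw [hmm, foldA_runs, pvRunsB]
    simp
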